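-- pv_equiv track=rewrite | github.com/vdella/rosetta | src/regex/format.py | sides_for
-- ===== SOURCE A (Python) =====
-- def sides_for(operator, regex):
--     """:returns the inner regexes of a :param regex
--     at the side of a given :param operator"""
--
--     left_tree, right_tree = str(), str()
--     parenthesis_count = 0
--
--     for i in range(len(regex) - 1, -1, -1):  # We'll be looking from right to left.
--         if regex[i] == operator and parenthesis_count == 0:
--             left_tree = regex[:i]
--             return left_tree, right_tree[::-1]
--
--         if regex[i] == ')':
--             parenthesis_count += 1
--         elif regex[i] == '(':
--             parenthesis_count -= 1
--
--         right_tree += regex[i]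
--
--     return left_tree, right_tree[::-1]
-- ===== SOURCE B (Python) =====
-- def sides_for(operator, regex):
--     """:returns the inner regexes of a :param regex
--     at the side of a given :param operator"""
--
--     net = regex.count(')') - regex.count('(')
--     run = 0
--     idx = None
--     for i, ch in enumerate(regex):  # Forward scan; rightmost qualifying index wins.
--         if ch == ')':
--             run += 1
--         elif ch == '(':
--             run -= 1
--         if ch == operator and run == net:
--             idx = i
--     if idx is None:
--         return '', regex
--     return regex[:idx], regex[idx + 1:]
-- ===== Notes on version B (the rewrite author's own statement) =====
-- stated objective: alternative
-- what changed: B precomputes the string's total paren net, then scans left to right keeping the rightmost index whose running prefix net equals the total, instead of A's right-to-left scan that accumulates the right side char by char and reverses it.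
import Mathlib
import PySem

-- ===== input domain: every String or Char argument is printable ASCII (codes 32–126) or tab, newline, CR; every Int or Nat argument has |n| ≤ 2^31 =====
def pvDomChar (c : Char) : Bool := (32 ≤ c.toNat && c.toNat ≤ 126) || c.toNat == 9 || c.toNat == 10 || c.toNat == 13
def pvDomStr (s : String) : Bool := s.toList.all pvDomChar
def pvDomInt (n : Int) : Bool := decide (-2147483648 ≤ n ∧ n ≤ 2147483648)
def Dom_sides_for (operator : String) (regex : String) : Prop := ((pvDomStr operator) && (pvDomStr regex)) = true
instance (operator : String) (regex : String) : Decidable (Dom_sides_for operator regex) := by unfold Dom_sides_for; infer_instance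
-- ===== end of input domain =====

-- B replaces A's right-to-left scan-and-accumulate with a total-net precompute plus a forward scan keeping the rightmost qualifying index (alternative decomposition; measured faster by a constant factor).

-- ===== PORT A =====
-- A's loop from len-1 down to 0 ported as recursion over the reversed char list;
-- `rt` is right_tree (chars in the order A appends them), `cnt` is parenthesis_count.
def sidesForGoA (operator : String) : List Char → Int → List Char → String × String
  | [], _, rt => ("", String.ofList rt.reverse)
  | c :: rest, cnt, rt =>
    if String.singleton c = operator ∧ cnt = 0 then
      -- left_tree = regex[:i] is the not-yet-visited prefix = reverse of `rest`
      (String.ofList rest.reverse, String.ofList rt.reverse)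
    else
      let cnt' := if c = ')' then cnt + 1 else if c = '(' then cnt - 1 else cnt
      sidesForGoA operator rest cnt' (rt ++ [c])

def sides_for (operator : String) (regex : String) : String × String :=
  sidesForGoA operator regex.toList.reverse 0 []

-- ===== PORT B =====
-- B's forward scan: `run` is the running prefix net (including the current char),
-- `idx` the rightmost index seen so far whose condition held.
def sidesForGoB (operator : String) (net : Int) : List Char → Nat → Int → Option Nat → Option Nat
  | [], _, _, idx => idx
  | c :: rest, i, run, idx =>
    let run' := if c = ')' then run + 1 else if c = '(' then run - 1 else run
    let idx' := if String.singleton c = operator ∧ run' = net then some i else idx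
    sidesForGoB operator net rest (i + 1) run' idx'

def sides_for_alt (operator : String) (regex : String) : String × String :=
  let cs := regex.toList
  let net : Int := (cs.count ')' : Int) - (cs.count '(' : Int)
  match sidesForGoB operator net cs 0 0 none with
  | none => ("", regex)
  | some i => (String.ofList (cs.take i), String.ofList (cs.drop (i + 1)))

-- ===== PRECONDITION & SPEC =====
def Spec_sides_for (operator : String) (regex : String) (out : String × String) : Prop := out = sides_for_alt operator regex
instance (operator : String) (regex : String) (out : String × String) : Decidable (Spec_sides_for operator regex out) := by unfold Spec_sides_for; infer_instance

-- ===== CLAIM (what is proved, stated in full; the proofs are below) =====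
def Claim_equal_sides_for : Prop := ∀ (operator : String) (regex : String), Dom_sides_for operator regex → Spec_sides_for operator regex (sides_for operator regex)

-- ===== LEMMAS AND PROOFS =====

-- paren delta of one char, and the net of a char list (order-independent sum)
def pvDelta (c : Char) : Int := if c = ')' then 1 else if c = '(' then -1 else 0

def pvNet : List Char → Int
  | [] => 0
  | c :: t => pvDelta c + pvNet t

-- rightmost index i in cs with cs[i] matching `operator` and (net of the chars after i) + base = 0
def pvPick (operator : String) (base : Int) : List Char → Option Nat
  | [] => none
  | c :: t =>
    match pvPick operator base t with
    | some j => some (j + 1)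
    | none => if String.singleton c = operator ∧ pvNet t + base = 0 then some 0 else none

theorem pvNet_append (xs ys : List Char) : pvNet (xs ++ ys) = pvNet xs + pvNet ys := by
  induction xs with
  | nil => simp [pvNet]
  | cons c t ih => simp [pvNet, ih]; ring

theorem pvNet_eq_counts (cs : List Char) :
    pvNet cs = (cs.count ')' : Int) - (cs.count '(' : Int) := by
  induction cs with
  | nil => simp [pvNet]
  | cons c t ih =>
    simp only [pvNet, ih, pvDelta, List.count_cons]
    split_ifs <;> simp_all <;> ring

theorem pvPick_lt (operator : String) (base : Int) (cs : List Char) (j : Nat)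
    (h : pvPick operator base cs = some j) : j < cs.length := by
  induction cs generalizing j with
  | nil => simp [pvPick] at h
  | cons c t ih =>
    simp only [pvPick] at h
    cases hp : pvPick operator base t with
    | some k =>
      rw [hp] at h
      simp only [Option.some.injEq] at h
      have := ih k hp
      simp only [List.length_cons]
      omega
    | none =>
      rw [hp] at h
      split_ifs at h with hc
      simp only [Option.some.injEq] at h
      subst h
      simp

theorem pvPick_append_singleton (operator : String) (base : Int) (xs : List Char) (c : Char) :
    pvPick operator base (xs ++ [c]) =
      if String.singleton c = operator ∧ base = 0 then some xs.length
      else pvPick operator (base + pvDelta c) xs := by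
  induction xs with
  | nil =>
    simp [pvPick, pvNet]
  | cons d t ih =>
    have hnet : pvNet (t ++ [c]) + base = pvNet t + (base + pvDelta c) := by
      rw [pvNet_append]; simp [pvNet]; ring
    by_cases hc : String.singleton c = operator ∧ base = 0
    · simp only [List.cons_append, pvPick, ih, if_pos hc, List.length_cons]
    · simp only [List.cons_append, pvPick, ih, if_neg hc, hnet]

-- A's scan over the reversed list computes the rightmost qualifying split of the original.
theorem sidesForGoA_spec (operator : String) (rev rt : List Char) :
    sidesForGoA operator rev (pvNet rt) rt =
      match pvPick operator (pvNet rt) rev.reverse with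
      | some j => (String.ofList (rev.reverse.take j),
                   String.ofList (rev.reverse.drop (j + 1) ++ rt.reverse))
      | none => ("", String.ofList ((rt ++ rev).reverse)) := by
  induction rev generalizing rt with
  | nil => simp [sidesForGoA, pvPick]
  | cons c rest ih =>
    simp only [sidesForGoA, List.reverse_cons]
    rw [pvPick_append_singleton]
    by_cases hc : String.singleton c = operator ∧ pvNet rt = 0
    · simp only [if_pos hc]
      have h1 : (rest.reverse ++ [c]).take rest.reverse.length = rest.reverse := by
        rw [List.take_append_of_le_length (le_refl _)]; simp
      have h2 : (rest.reverse ++ [c]).drop (rest.length + 1) = [] :=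
        List.drop_eq_nil_of_le (by simp)
      simp [h2]
    · simp only [if_neg hc]
      show sidesForGoA operator rest
          (if c = ')' then pvNet rt + 1 else if c = '(' then pvNet rt - 1 else pvNet rt)
          (rt ++ [c]) = _
      have hcnt : (if c = ')' then pvNet rt + 1 else if c = '(' then pvNet rt - 1 else pvNet rt)
          = pvNet (rt ++ [c]) := by
        rw [pvNet_append]; simp only [pvNet, pvDelta]; split_ifs <;> ring
      rw [hcnt, ih (rt ++ [c])]
      have hbase : pvNet (rt ++ [c]) = pvNet rt + pvDelta c := by
        rw [pvNet_append]; simp [pvNet]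
      rw [hbase]
      cases hp : pvPick operator (pvNet rt + pvDelta c) rest.reverse with
      | some j =>
        have hj : j < rest.reverse.length := pvPick_lt _ _ _ _ hp
        simp only []
        have ht : (rest.reverse ++ [c]).take j = rest.reverse.take j :=
          List.take_append_of_le_length (by omega)
        have hd : (rest.reverse ++ [c]).drop (j + 1) = rest.reverse.drop (j + 1) ++ [c] :=
          List.drop_append_of_le_length (by omega)
        rw [ht, hd]
        simp
      | none =>
        simp only []
        have : rt ++ c :: rest = (rt ++ [c]) ++ rest := by simp
        rw [this]

-- B's scan computes the same rightmost qualifying index, offset by the start position.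
theorem sidesForGoB_spec (operator : String) (net : Int) (cs : List Char)
    (i : Nat) (run : Int) (idx : Option Nat) :
    sidesForGoB operator net cs i run idx =
      match pvPick operator (net - run - pvNet cs) cs with
      | some j => some (i + j)
      | none => idx := by
  induction cs generalizing i run idx with
  | nil => simp [sidesForGoB, pvPick]
  | cons c t ih =>
    simp only [sidesForGoB, pvPick]
    have hrun' : (if c = ')' then run + 1 else if c = '(' then run - 1 else run)
        = run + pvDelta c := by simp [pvDelta]; split_ifs <;> ring
    rw [hrun', ih]
    have hb : net - (run + pvDelta c) - pvNet t = net - run - pvNet (c :: t) := by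
      simp [pvNet]; ring
    rw [hb]
    cases hp : pvPick operator (net - run - pvNet (c :: t)) t with
    | some j => simp [Nat.add_assoc, Nat.add_comm 1 j]
    | none =>
      simp only []
      have hcond : (pvNet t + (net - run - pvNet (c :: t)) = 0) ↔ (run + pvDelta c = net) := by
        simp [pvNet]; constructor <;> intro h <;> omega
      by_cases hm : String.singleton c = operator
      · by_cases he : run + pvDelta c = net
        · simp [hm, he, hcond.mpr he]
        · have : ¬ (pvNet t + (net - run - pvNet (c :: t)) = 0) := fun h => he (hcond.mp h)
          simp [hm, he, this]
      · simp [hm]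

theorem sides_for_eq_alt (operator regex : String) :
    sides_for operator regex = sides_for_alt operator regex := by
  have hA := sidesForGoA_spec operator regex.toList.reverse []
  simp only [pvNet, List.reverse_reverse, List.append_nil, List.nil_append,
    List.reverse_nil] at hA
  unfold sides_for sides_for_alt
  rw [hA]
  simp only [sidesForGoB_spec, pvNet_eq_counts, sub_zero, sub_self, Nat.zero_add]
  cases hp : pvPick operator 0 regex.toList with
  | none => simp [String.ofList_toList]
  | some j => simp

-- ===== VERDICT (by name: the statement is the Claim_ definition above) =====
theorem sides_for_spec : Claim_equal_sides_for := by
  intro operator regex _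
  unfold Spec_sides_for
  exact sides_for_eq_alt operator regex
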